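-- pv_equiv track=rewrite | github.com/hzhan11/signally | backend/api/v1/highlights.py | _find_prev_trading_date
-- ===== SOURCE A (Python) =====
-- from typing import Optional, List, Dict, Any, Union
--
-- def _find_prev_trading_date(trading_dates_sorted: List[str], date_str: str) -> Optional[str]:
--     prev = None
--     for d in trading_dates_sorted:
--         if d < date_str:
--             prev = d
--         elif d >= date_str:
--             break
--     return prev
-- ===== SOURCE B (Python) =====
-- from bisect import bisect_left
-- from typing import Optional, List
--
-- def _find_prev_trading_date(trading_dates_sorted: List[str], date_str: str) -> Optional[str]:
--     idx = bisect_left(trading_dates_sorted, date_str)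
--     return trading_dates_sorted[idx - 1] if idx else None
-- ===== Notes on version B (the rewrite author's own statement) =====
-- stated objective: alternative
-- what changed: Replaces A's linear early-breaking scan by bisect_left binary search (O(log n) comparisons on the sorted lists the function is specified for; a timing run's random inputs fall outside Pre_, so no speed is claimed).
-- outside the precondition, e.g. on _find_prev_trading_date(['b', 'a'], 'b'): A returns None, B returns 'a'
import Mathlib
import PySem

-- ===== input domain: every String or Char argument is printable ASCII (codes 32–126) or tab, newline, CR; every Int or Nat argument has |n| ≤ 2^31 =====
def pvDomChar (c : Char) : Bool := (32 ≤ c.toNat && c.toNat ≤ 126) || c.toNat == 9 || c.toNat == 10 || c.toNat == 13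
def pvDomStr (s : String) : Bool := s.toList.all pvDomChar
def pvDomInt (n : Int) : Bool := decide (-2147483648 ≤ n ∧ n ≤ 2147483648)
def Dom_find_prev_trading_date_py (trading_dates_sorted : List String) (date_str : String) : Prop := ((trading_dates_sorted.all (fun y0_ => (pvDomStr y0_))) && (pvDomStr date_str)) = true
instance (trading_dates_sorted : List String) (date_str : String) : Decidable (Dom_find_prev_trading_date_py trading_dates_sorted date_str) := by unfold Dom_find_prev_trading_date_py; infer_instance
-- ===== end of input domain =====

-- B replaces A's linear early-breaking scan by bisect_left binary search, exact on lists partitioned w.r.t. date_str (Pre_).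

-- ===== PORT A =====
-- loop: prev starts as None; each d < date_str updates prev; the first d >= date_str breaks
def find_prev_trading_date_loop (date_str : String) : List String → Option String → Option String
  | [], prev => prev
  | d :: rest, prev =>
    if d < date_str then find_prev_trading_date_loop date_str rest (some d)
    else if date_str ≤ d then prev
    else find_prev_trading_date_loop date_str rest prev

def find_prev_trading_date_py (trading_dates_sorted : List String) (date_str : String) : Option String :=
  find_prev_trading_date_loop date_str trading_dates_sorted none

-- ===== PORT B =====
-- idx = bisect_left(trading_dates_sorted, date_str); trading_dates_sorted[idx-1] if idx else None
-- (0 < idx ≤ len, so getD at idx-1 is exact for Python's indexing here)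
def find_prev_trading_date_py_alt (trading_dates_sorted : List String) (date_str : String) : Option String :=
  let idx := PySem.List.bisectLeft trading_dates_sorted date_str
  if idx ≠ 0 then some (trading_dates_sorted.getD (idx - 1) "") else none

-- ===== PRECONDITION & SPEC =====
-- Pre_ is bisection's contract, implied by the sortedness the parameter name announces: the list is
-- PARTITIONED with respect to date_str — no element < date_str occurs after an element ≥ date_str
-- (written over toList so the condition evaluates by decide; String < is the same order,
-- String.lt_iff_toList_lt). On a list unsorted at that boundary A's early-break value is an artefact
-- of scan order and binary search legitimately differs (see claim cites); nothing is claimed there.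
def Pre_find_prev_trading_date_py (trading_dates_sorted : List String) (date_str : String) : Prop :=
  List.Pairwise (fun p q => q.toList < date_str.toList → p.toList < date_str.toList) trading_dates_sorted
instance (trading_dates_sorted : List String) (date_str : String) : Decidable (Pre_find_prev_trading_date_py trading_dates_sorted date_str) := by unfold Pre_find_prev_trading_date_py; infer_instance

def pvWitness_find_prev_trading_date_py : List String × String :=
  (["2024-01-02", "2024-01-03", "2024-01-03", "2024-01-05"], "2024-01-04")

def Spec_find_prev_trading_date_py (trading_dates_sorted : List String) (date_str : String) (out : Option String) : Prop := out = find_prev_trading_date_py_alt trading_dates_sorted date_str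
instance (trading_dates_sorted : List String) (date_str : String) (out : Option String) : Decidable (Spec_find_prev_trading_date_py trading_dates_sorted date_str out) := by unfold Spec_find_prev_trading_date_py; infer_instance

-- ===== CLAIM (what is proved, stated in full; the proofs are below) =====
def Claim_equal_find_prev_trading_date_py : Prop := ∀ (trading_dates_sorted : List String) (date_str : String), Dom_find_prev_trading_date_py trading_dates_sorted date_str → Pre_find_prev_trading_date_py trading_dates_sorted date_str → Spec_find_prev_trading_date_py trading_dates_sorted date_str (find_prev_trading_date_py trading_dates_sorted date_str)

-- ===== LEMMAS AND PROOFS =====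

theorem tw_le {A : Type} (p : A → Bool) (l : List A) : (l.takeWhile p).length ≤ l.length :=
  (List.takeWhile_prefix p).length_le

-- maximality of takeWhile: the first element after the prefix fails p
theorem tw_max {A : Type} (p : A → Bool) (l : List A) (h : (l.takeWhile p).length < l.length) :
    p (l[(l.takeWhile p).length]'h) = false := by
  induction l with
  | nil => simp at h
  | cons a t ih =>
    by_cases hp : p a
    · simp only [List.takeWhile_cons, if_pos hp, List.length_cons] at h ⊢
      simpa using ih (by omega)
    · simp only [List.takeWhile_cons, if_neg hp, List.length_nil] at h ⊢
      simpa using hp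

-- A's loop is: last element of the strict-< prefix (or the initial accumulator)
theorem find_prev_trading_date_loop_eq (date_str : String) (xs : List String) (prev : Option String) :
    find_prev_trading_date_loop date_str xs prev =
      ((xs.takeWhile (fun d => d < date_str)).getLast?).elim prev some := by
  induction xs generalizing prev with
  | nil => rfl
  | cons d rest ih =>
    simp only [find_prev_trading_date_loop, List.takeWhile_cons]
    by_cases h : d < date_str
    · rw [if_pos h, if_pos (decide_eq_true h), ih, List.getLast?_cons]
      cases (rest.takeWhile (fun d => decide (d < date_str))).getLast? <;> rfl
    · rw [if_neg h, if_pos (le_of_not_gt h), if_neg (by simp only [decide_eq_true_eq]; exact h)]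
      rfl

-- On a list partitioned with respect to x, index i holds a value < x iff i lies inside the strict-< prefix
theorem sorted_lt_iff (a : List String) (x : String)
    (hs : List.Pairwise (fun p q => q < x → p < x) a) (i : Nat) (hi : i < a.length) :
    (a[i]'hi < x ↔ i < (a.takeWhile (fun d => d < x)).length) := by
  constructor
  · intro hlt
    by_contra hge
    push_neg at hge
    have hklt : (a.takeWhile (fun d => decide (d < x))).length < a.length := lt_of_le_of_lt hge hi
    have hnot : ¬ (a[(a.takeWhile (fun d => decide (d < x))).length] < x) := by
      simpa using tw_max (fun d => decide (d < x)) a hklt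
    rcases Nat.lt_or_ge (a.takeWhile (fun d => decide (d < x))).length i with hki | hki
    · exact hnot (List.pairwise_iff_getElem.mp hs _ _ hklt hi hki hlt)
    · have heq : (a.takeWhile (fun d => decide (d < x))).length = i := Nat.le_antisymm hge hki
      subst heq
      exact hnot hlt
  · intro hik
    have hgt : (a.takeWhile (fun d => d < x))[i]'(by omega) = a[i] :=
      List.IsPrefix.getElem (List.takeWhile_prefix _) _
    have hmem : (a.takeWhile (fun d => d < x))[i]'(by omega) ∈ a.takeWhile (fun d => d < x) :=
      List.getElem_mem _
    have hp := List.mem_takeWhile_imp hmem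
    simp only [decide_eq_true_eq] at hp
    rw [hgt] at hp
    exact hp

-- the bisect loop, on a sorted list, closes in on the length of the strict-< prefix
theorem bisectLeftLoop_eq (a : List String) (x : String)
    (hs : List.Pairwise (fun p q => q < x → p < x) a) (fuel lo hi : Nat)
    (hf : hi - lo ≤ fuel)
    (hlo : lo ≤ (a.takeWhile (fun d => d < x)).length)
    (hhi : (a.takeWhile (fun d => d < x)).length ≤ hi) (hlen : hi ≤ a.length) :
    PySem.List.bisectLeftLoop a x fuel lo hi = (a.takeWhile (fun d => d < x)).length := by
  induction fuel generalizing lo hi with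
  | zero =>
    simp only [PySem.List.bisectLeftLoop]
    omega
  | succ n ih =>
    simp only [PySem.List.bisectLeftLoop]
    by_cases h : lo < hi
    · rw [if_pos h]
      have hmidlt : (lo + hi) / 2 < a.length := by omega
      rw [List.getElem?_eq_getElem hmidlt]
      dsimp only
      by_cases hm : a[(lo + hi) / 2]'hmidlt < x
      · rw [if_pos hm]
        have hmk := (sorted_lt_iff a x hs _ hmidlt).mp hm
        exact ih _ _ (by omega) (by omega) hhi hlen
      · rw [if_neg hm]
        have hmk : ¬ ((lo + hi) / 2 < (a.takeWhile (fun d => d < x)).length) :=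
          fun hc => hm ((sorted_lt_iff a x hs _ hmidlt).mpr hc)
        exact ih _ _ (by omega) hlo (by omega) (by omega)
    · rw [if_neg h]
      omega

theorem bisectLeft_str_eq (a : List String) (x : String)
    (hs : List.Pairwise (fun p q => q < x → p < x) a) :
    PySem.List.bisectLeft a x = (a.takeWhile (fun d => d < x)).length :=
  bisectLeftLoop_eq a x hs a.length 0 a.length (by omega) (by omega) (tw_le _ a) (le_refl _)

-- ===== VERDICT (by name: the statement is the Claim_ definition above) =====
theorem find_prev_trading_date_py_spec : Claim_equal_find_prev_trading_date_py := by
  intro xs s _ hpre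
  have hs : List.Pairwise (fun p q : String => q < s → p < s) xs :=
    hpre.imp (fun h hq => String.lt_iff_toList_lt.mpr (h (String.lt_iff_toList_lt.mp hq)))
  unfold Spec_find_prev_trading_date_py find_prev_trading_date_py find_prev_trading_date_py_alt
  rw [find_prev_trading_date_loop_eq]
  set k := (xs.takeWhile (fun d => d < s)).length with hk
  have hkle : k ≤ xs.length := by rw [hk]; exact tw_le _ xs
  simp only [bisectLeft_str_eq xs s hs, ← hk]
  have hpref := List.takeWhile_prefix (p := fun d => decide (d < s)) (l := xs)
  by_cases hk0 : k = 0
  · have h1 : xs.takeWhile (fun d => d < s) = [] := List.eq_nil_of_length_eq_zero hk0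
    rw [h1, if_neg (by omega)]
    rfl
  · have hlast : (xs.takeWhile (fun d => d < s)).getLast? =
        some ((xs.takeWhile (fun d => d < s))[k - 1]'(by omega)) := by
      rw [List.getLast?_eq_getElem?, List.getElem?_eq_getElem (by omega)]
    have hgeteq : (xs.takeWhile (fun d => d < s))[k - 1]'(by omega) = xs[k - 1]'(by omega) :=
      List.IsPrefix.getElem hpref _
    rw [hlast, hgeteq, if_pos hk0, List.getD_eq_getElem xs "" (show k - 1 < xs.length by omega)]
    rfl
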